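-- pv_equiv track=rewrite | github.com/Hansung-include/Coding-Test-Study | 11주차/7795/이준형_7795.py | solution
-- ===== SOURCE A (Python) =====
-- def solution(a_list, b_list):
--     answer = 0
--     a_list = sorted(a_list)
--     b_list = sorted(b_list)
--
--     b_pos = 0
--     for a in a_list:
--         # a 요소가 중복 + b 보다 작을때
--         if a <= b_list[b_pos]:
--             answer += b_pos
--             continue
--
--         while a > b_list[b_pos]:
--             if b_pos < len(b_list)-1:
--                 b_pos += 1
--             # 인덱스 범위 초과할 경우
--             else:
--                 break
--
--         if a <= b_list[b_pos]:
--             answer += b_pos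
--         else:
--             answer += b_pos+1
--
--     return answer
-- ===== SOURCE B (Python) =====
-- def solution(a_list, b_list):
--     # Sort only b_list; for each a, a hand-written binary search (bisect_left)
--     # counts the elements of b_list strictly smaller than a.
--     b_sorted = sorted(b_list)
--     answer = 0
--     for a in a_list:
--         lo, hi = 0, len(b_sorted)
--         while lo < hi:
--             mid = (lo + hi) // 2
--             if b_sorted[mid] < a:
--                 lo = mid + 1
--             else:
--                 hi = mid
--         answer += lo
--     return answer
-- ===== Notes on version B (the rewrite author's own statement) =====
-- stated objective: simpler
-- what changed: Replaces the stateful two-pointer sweep over both sorted lists with sorting only b_list and summing an independent binary-search count (bisect_left, hand-written since A imports nothing) of elements smaller than each a.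
import Mathlib
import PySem

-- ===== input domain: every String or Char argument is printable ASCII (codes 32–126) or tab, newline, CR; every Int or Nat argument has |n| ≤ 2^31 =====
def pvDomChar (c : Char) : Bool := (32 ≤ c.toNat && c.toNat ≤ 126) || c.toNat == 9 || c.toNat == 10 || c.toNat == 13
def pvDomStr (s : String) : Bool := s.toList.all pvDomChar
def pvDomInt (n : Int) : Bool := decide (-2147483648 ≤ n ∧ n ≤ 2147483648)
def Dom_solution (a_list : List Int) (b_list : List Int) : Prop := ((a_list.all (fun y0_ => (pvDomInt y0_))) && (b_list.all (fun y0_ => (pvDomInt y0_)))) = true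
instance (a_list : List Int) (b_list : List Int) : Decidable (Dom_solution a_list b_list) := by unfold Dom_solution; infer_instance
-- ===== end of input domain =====

-- B replaces A's stateful two-pointer sweep over both sorted lists by sorting only b_list and
-- summing, for each a, a hand-written binary-search count of the b-elements smaller than a
-- (simpler: no cross-iteration pointer state). Where A raises IndexError (a_list ≠ [] and
-- b_list = []), B's algorithm returns 0; those inputs are outside Pre_solution.

-- ===== PORT A =====
-- A's inner while loop: advance b_pos while a > b_list[b_pos], capped at len(b_list)-1
def solWhile (bs : List Int) (a : Int) (p : Nat) : Nat :=
  if a > PySem.List.pyGetD bs (p : Int) 0 then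
    if _h : p < bs.length - 1 then solWhile bs a (p + 1) else p
  else p
termination_by bs.length - p
decreasing_by omega

-- one iteration of A's for loop; state = (answer, b_pos); p = b_pos after the while loop
def solStep (bs : List Int) (st : Int × Nat) (a : Int) : Int × Nat :=
  if a ≤ PySem.List.pyGetD bs (st.2 : Int) 0 then (st.1 + (st.2 : Int), st.2)   -- continue
  else if a ≤ PySem.List.pyGetD bs ((solWhile bs a st.2 : Nat) : Int) 0 then
    (st.1 + (solWhile bs a st.2 : Int), solWhile bs a st.2)
  else (st.1 + (solWhile bs a st.2 : Int) + 1, solWhile bs a st.2)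

def solution (a_list : List Int) (b_list : List Int) : Int :=
  let as := PySem.List.sorted a_list (fun x => x) false
  let bs := PySem.List.sorted b_list (fun x => x) false
  (as.foldl (solStep bs) (0, 0)).1

-- ===== PORT B =====
-- B's hand-written bisect_left loop; mid = (lo+hi)//2: lo, hi stay non-negative, so Nat '/' is Python's '//'
def bisectLoop (bs : List Int) (x : Int) (lo hi : Nat) : Nat :=
  if _h : lo < hi then
    if PySem.List.pyGetD bs (((lo + hi) / 2 : Nat) : Int) 0 < x then bisectLoop bs x ((lo + hi) / 2 + 1) hi
    else bisectLoop bs x lo ((lo + hi) / 2)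
  else lo
termination_by hi - lo
decreasing_by all_goals omega

def solution_alt (a_list : List Int) (b_list : List Int) : Int :=
  let bs := PySem.List.sorted b_list (fun x => x) false
  a_list.foldl (fun acc a => acc + (bisectLoop bs a 0 bs.length : Int)) 0

-- ===== PRECONDITION & SPEC =====
-- Pre_ excludes exactly the inputs where A raises IndexError: a_list non-empty with b_list empty.
def Pre_solution (a_list : List Int) (b_list : List Int) : Prop := a_list = [] ∨ b_list ≠ []
instance (a_list : List Int) (b_list : List Int) : Decidable (Pre_solution a_list b_list) := by
  unfold Pre_solution; infer_instance

def pvWitness_solution : List Int × List Int := ([2, 1, 3], [1, 2])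

def Spec_solution (a_list : List Int) (b_list : List Int) (out : Int) : Prop := out = solution_alt a_list b_list
instance (a_list : List Int) (b_list : List Int) (out : Int) : Decidable (Spec_solution a_list b_list out) := by unfold Spec_solution; infer_instance

-- ===== CLAIM (what is proved, stated in full; the proofs are below) =====
def Claim_equal_solution : Prop := ∀ (a_list : List Int) (b_list : List Int), Dom_solution a_list b_list → Pre_solution a_list b_list → Spec_solution a_list b_list (solution a_list b_list)

-- ===== LEMMAS AND PROOFS =====

-- number of elements of bs strictly below x (the bisect_left position on a sorted bs)
def pvCnt (bs : List Int) (x : Int) : Nat := bs.countP (fun b => decide (b < x))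

lemma pvCnt_le_length (bs : List Int) (x : Int) : pvCnt bs x ≤ bs.length :=
  List.countP_le_length

lemma pvCnt_mono (bs : List Int) {x y : Int} (hxy : x ≤ y) : pvCnt bs x ≤ pvCnt bs y := by
  apply List.countP_mono_left
  intro b _ hb
  simp only [decide_eq_true_eq] at hb ⊢
  omega

lemma pvCnt_ge (bs : List Int) (x : Int) (k : Nat) (hk : k ≤ bs.length)
    (h : ∀ i, i < k → PySem.List.pyGetD bs (i : Int) 0 < x) : k ≤ pvCnt bs x := by
  have hsplit : pvCnt bs x
      = (bs.take k).countP (fun b => decide (b < x)) + (bs.drop k).countP (fun b => decide (b < x)) := by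
    rw [pvCnt, ← List.countP_append, List.take_append_drop]
  have htake : (bs.take k).countP (fun b => decide (b < x)) = (bs.take k).length := by
    apply List.countP_eq_length.2
    intro b hb
    obtain ⟨i, hi, rfl⟩ := List.getElem_of_mem hb
    rw [List.getElem_take]
    have hlen' : (bs.take k).length = k := by simp [List.length_take]; omega
    have hik : i < k := by omega
    have hilen : i < bs.length := by omega
    have hx := h i hik
    rw [PySem.List.pyGetD_natCast, List.getD_eq_getElem _ _ hilen] at hx
    simpa using hx
  have hlen : (bs.take k).length = k := by simp [List.length_take]; omega
  omega

lemma pvCnt_le (bs : List Int) (x : Int) (k : Nat) (hs : bs.Pairwise (· ≤ ·)) (hk : k < bs.length)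
    (hx : x ≤ PySem.List.pyGetD bs (k : Int) 0) : pvCnt bs x ≤ k := by
  have hbk : x ≤ bs[k] := by
    rwa [PySem.List.pyGetD_natCast, List.getD_eq_getElem _ _ hk] at hx
  have hsplit : pvCnt bs x
      = (bs.take k).countP (fun b => decide (b < x)) + (bs.drop k).countP (fun b => decide (b < x)) := by
    rw [pvCnt, ← List.countP_append, List.take_append_drop]
  have hdrop : (bs.drop k).countP (fun b => decide (b < x)) = 0 := by
    apply List.countP_eq_zero.2
    intro b hb
    obtain ⟨i, hi, rfl⟩ := List.getElem_of_mem hb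
    rw [List.getElem_drop]
    have hklen : k + i < bs.length := by simp [List.length_drop] at hi; omega
    have hle : bs[k] ≤ bs[k + i] := by
      rcases Nat.eq_zero_or_pos i with h0 | h0
      · subst h0; simp
      · exact (List.pairwise_iff_getElem.1 hs) k (k + i) hk hklen (by omega)
    simp only [decide_eq_true_eq]
    omega
  have htake : (bs.take k).countP (fun b => decide (b < x)) ≤ k := by
    calc (bs.take k).countP (fun b => decide (b < x)) ≤ (bs.take k).length := List.countP_le_length
    _ ≤ k := by simp [List.length_take]
  omega

lemma pvCnt_lt_elem (bs : List Int) (x : Int) (hs : bs.Pairwise (· ≤ ·)) (i : Nat)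
    (hi : i < pvCnt bs x) : PySem.List.pyGetD bs (i : Int) 0 < x := by
  have hilen : i < bs.length := lt_of_lt_of_le hi (pvCnt_le_length bs x)
  by_contra h
  push_neg at h
  have := pvCnt_le bs x i hs hilen h
  omega

-- characterisation of A's while loop
lemma solWhile_spec (bs : List Int) (a : Int) (p : Nat) (hp : p < bs.length)
    (hlt : ∀ i, i < p → PySem.List.pyGetD bs (i : Int) 0 < a) :
    solWhile bs a p < bs.length ∧
    (∀ i, i < solWhile bs a p → PySem.List.pyGetD bs (i : Int) 0 < a) ∧
    (a ≤ PySem.List.pyGetD bs ((solWhile bs a p : Nat) : Int) 0 ∨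
      (solWhile bs a p = bs.length - 1 ∧ PySem.List.pyGetD bs ((solWhile bs a p : Nat) : Int) 0 < a)) := by
  rw [solWhile]
  by_cases hcond : a > PySem.List.pyGetD bs (p : Int) 0
  · by_cases hlast : p < bs.length - 1
    · rw [if_pos hcond, dif_pos hlast]
      have hlt' : ∀ i, i < p + 1 → PySem.List.pyGetD bs (i : Int) 0 < a := by
        intro i hi
        rcases Nat.lt_succ_iff_lt_or_eq.1 hi with h | h
        · exact hlt i h
        · subst h; exact hcond
      exact solWhile_spec bs a (p + 1) (by omega) hlt'
    · rw [if_pos hcond, dif_neg hlast]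
      exact ⟨hp, hlt, Or.inr ⟨by omega, hcond⟩⟩
  · rw [if_neg hcond]
    exact ⟨hp, hlt, Or.inl (not_lt.1 hcond)⟩
termination_by bs.length - p
decreasing_by omega

-- one step of A's loop adds exactly pvCnt bs a and keeps the pointer invariant
lemma solStep_spec (bs : List Int) (a : Int) (hs : bs.Pairwise (· ≤ ·)) (ans : Int) (p : Nat)
    (hp : p < bs.length) (hinv : p ≤ pvCnt bs a) :
    (solStep bs (ans, p) a).1 = ans + (pvCnt bs a : Int) ∧
    (solStep bs (ans, p) a).2 < bs.length ∧ (solStep bs (ans, p) a).2 ≤ pvCnt bs a := by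
  have hlt : ∀ i, i < p → PySem.List.pyGetD bs (i : Int) 0 < a := by
    intro i hi
    exact pvCnt_lt_elem bs a hs i (by omega)
  simp only [solStep]
  by_cases h1 : a ≤ PySem.List.pyGetD bs (p : Int) 0
  · have hle : pvCnt bs a ≤ p := pvCnt_le bs a p hs hp h1
    have hpc : pvCnt bs a = p := le_antisymm hle hinv
    rw [if_pos h1]
    exact ⟨by rw [hpc], by simpa using hp, by simp [hpc]⟩
  · rw [if_neg h1]
    obtain ⟨hq, hqlt, hcase⟩ := solWhile_spec bs a p hp hlt
    set q := solWhile bs a p with hqdef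
    by_cases h2 : a ≤ PySem.List.pyGetD bs (q : Int) 0
    · have hge : q ≤ pvCnt bs a := pvCnt_ge bs a q (by omega) hqlt
      have hle : pvCnt bs a ≤ q := pvCnt_le bs a q hs hq h2
      have hpc : pvCnt bs a = q := le_antisymm hle hge
      rw [if_pos h2]
      exact ⟨by rw [hpc], by simpa using hq, by simp [hpc]⟩
    · rcases hcase with hc | ⟨hql, _⟩
      · exact absurd hc h2
      · push_neg at h2
        have hall : ∀ i, i < bs.length → PySem.List.pyGetD bs (i : Int) 0 < a := by
          intro i hi
          rcases Nat.lt_or_ge i q with h | h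
          · exact hqlt i h
          · have hiq : i = q := by omega
            subst hiq
            exact h2
        have hge : bs.length ≤ pvCnt bs a := pvCnt_ge bs a bs.length le_rfl hall
        have hlen : pvCnt bs a = bs.length := le_antisymm (pvCnt_le_length bs a) hge
        rw [if_neg (not_le.2 h2)]
        refine ⟨?_, by simpa using hq, by omega⟩
        simp only []
        omega

lemma fold_spec (bs : List Int) (hs : bs.Pairwise (· ≤ ·)) :
    ∀ (as : List Int) (ans : Int) (p : Nat), as.Pairwise (· ≤ ·) → p < bs.length →
      (∀ x ∈ as, p ≤ pvCnt bs x) →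
      (as.foldl (solStep bs) (ans, p)).1 = ans + (as.map (fun x => (pvCnt bs x : Int))).sum := by
  intro as
  induction as with
  | nil => intro ans p _ _ _; simp
  | cons a t ih =>
    intro ans p hpw hp hinv
    have hstep := solStep_spec bs a hs ans p hp (hinv a (by simp))
    have hpw' : t.Pairwise (· ≤ ·) := hpw.of_cons
    have hat : ∀ x ∈ t, a ≤ x := by
      intro x hx
      exact (List.pairwise_cons.1 hpw).1 x hx
    simp only [List.foldl_cons, List.map_cons, List.sum_cons]
    have hpair : solStep bs (ans, p) a
        = ((solStep bs (ans, p) a).1, (solStep bs (ans, p) a).2) := rfl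
    rw [hpair, hstep.1]
    rw [ih (ans + (pvCnt bs a : Int)) (solStep bs (ans, p) a).2 hpw' hstep.2.1 ?_]
    · ring
    · intro x hx
      exact le_trans hstep.2.2 (pvCnt_mono bs (hat x hx))

-- B's binary search computes pvCnt on a sorted list
lemma bisectLoop_spec (bs : List Int) (x : Int) (hs : bs.Pairwise (· ≤ ·)) :
    ∀ (d lo hi : Nat), hi - lo ≤ d → lo ≤ pvCnt bs x → pvCnt bs x ≤ hi → hi ≤ bs.length →
      bisectLoop bs x lo hi = pvCnt bs x := by
  intro d
  induction d with
  | zero =>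
    intro lo hi hd hlo hhi _
    rw [bisectLoop]
    rw [dif_neg (by omega : ¬ lo < hi)]
    omega
  | succ n ih =>
    intro lo hi hd hlo hhi hlen
    rw [bisectLoop]
    by_cases hlt : lo < hi
    · rw [dif_pos hlt]
      set mid := (lo + hi) / 2 with hmid
      have hmlo : lo ≤ mid := by omega
      have hmhi : mid < hi := by omega
      have hmlen : mid < bs.length := by omega
      by_cases hb : PySem.List.pyGetD bs (mid : Int) 0 < x
      · rw [if_pos hb]
        have hge : mid + 1 ≤ pvCnt bs x := by
          apply pvCnt_ge bs x (mid + 1) (by omega)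
          intro i hi'
          rcases Nat.lt_or_ge i mid with h | h
          · have hilen : i < bs.length := by omega
            have hordered : bs[i] ≤ bs[mid] :=
              (List.pairwise_iff_getElem.1 hs) i mid hilen hmlen h
            have hbm : bs[mid] < x := by
              rwa [PySem.List.pyGetD_natCast, List.getD_eq_getElem _ _ hmlen] at hb
            rw [PySem.List.pyGetD_natCast, List.getD_eq_getElem _ _ hilen]
            omega
          · have hieq : i = mid := by omega
            subst hieq
            exact hb
        exact ih (mid + 1) hi (by omega) hge hhi hlen
      · rw [if_neg hb]
        push_neg at hb
        have hle : pvCnt bs x ≤ mid := pvCnt_le bs x mid hs hmlen hb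
        exact ih lo mid (by omega) hlo hle (by omega)
    · rw [dif_neg hlt]
      omega

-- ===== VERDICT (by name: the statement is the Claim_ definition above) =====
theorem solution_spec : Claim_equal_solution := by
  intro a_list b_list _dom hpre
  unfold Spec_solution solution solution_alt
  set bs := PySem.List.sorted b_list (fun x => x) false with hbs
  set as := PySem.List.sorted a_list (fun x => x) false with has
  have hsb : bs.Pairwise (· ≤ ·) := by
    have := PySem.List.sorted_pairwise b_list (fun x => x)
    simpa using this
  have hsa : as.Pairwise (· ≤ ·) := by
    have := PySem.List.sorted_pairwise a_list (fun x => x)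
    simpa using this
  rw [PySem.List.foldl_add]
  rcases hpre with hA | hB
  · subst hA
    have hase : as = [] := by
      rw [has]
      exact (PySem.List.sorted_eq_nil_iff _ _ _).2 rfl
    simp [hase]
  · have hbs_ne : bs ≠ [] := by
      rw [hbs]
      simpa [PySem.List.sorted_eq_nil_iff] using hB
    have hlen : 0 < bs.length := List.length_pos_iff.2 hbs_ne
    have hbisect : ∀ a : Int, bisectLoop bs a 0 bs.length = pvCnt bs a := by
      intro a
      exact bisectLoop_spec bs a hsb bs.length 0 bs.length (by omega)
        (Nat.zero_le _) (pvCnt_le_length bs a) le_rfl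
    have hfold := fold_spec bs hsb as 0 0 hsa hlen (fun x _ => Nat.zero_le _)
    rw [hfold]
    have hperm : as.Perm a_list := PySem.List.sorted_perm a_list (fun x => x) false
    have hmap : (as.map (fun x => (pvCnt bs x : Int))).Perm
        (a_list.map (fun x => (pvCnt bs x : Int))) := hperm.map _
    rw [List.Perm.sum_eq hmap]
    simp only [hbisect]
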